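-- pv_equiv track=rewrite | github.com/elapuestojoe/Iprep | python/LinkedIn/alternatingParityPermutations.py | alternatingParityPermutations
-- ===== SOURCE A (Python) =====
-- def computePermutations(l1, l2):
--     permutations = []
--     for i in range(len(l1)):
--         for j in range(len(l2)):
--             solution = []
--             x = 0
--             y = 0
--             while(x < len(l1) and y < len(l2)):
--                 solution.append(l1[x])
--                 solution.append(l2[y])
--                 x += 1
--                 y += 1
--
--             if(x < len(l1)):
--                 solution.append(l1[x])
--             if(y < len(l2)):
--                 solution.append(l2[y])
--
--             permutations.append(solution)
--             l2 = l2[1:] + [l2[0]]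
--         l1 = l1[1:] + [l1[0]]
--     return permutations
--
-- def alternatingParityPermutations(n):
--     solutions = []
--     even = []
--     odd = []
--     for i in range(1, n+1):
--         if(i & 1):
--             odd.append(i)
--         else:
--             even.append(i)
--
--     solutions += computePermutations(odd, even)
--     solutions += computePermutations(even, odd)
--
--     solutions.sort()
--     return solutions
-- ===== SOURCE B (Python) =====
-- def alternatingParityPermutations(n):
--     # Each of A's solutions is fully determined by its first two elements (f, s):
--     # the rest steps +2 with wraparound inside each parity class, pairing while both
--     # classes have elements left, then one leftover from the larger class.
--     # Distinct (f, s) give distinct solutions, so emitting f = 1..n with the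
--     # opposite-parity s ascending yields the result already in sorted order: no sort.
--     def nxt(v):
--         return v + 2 if v + 2 <= n else 2 - v % 2
--
--     def build(f, s):
--         ca = (n + 1) // 2 if f % 2 else n // 2
--         cb = n // 2 if f % 2 else (n + 1) // 2
--         m = min(ca, cb)
--         sol = []
--         a, b = f, s
--         for _ in range(m):
--             sol.append(a)
--             sol.append(b)
--             a = nxt(a)
--             b = nxt(b)
--         if m < ca:
--             sol.append(a)
--         if m < cb:
--             sol.append(b)
--         return sol
--
--     return [build(f, s)
--             for f in range(1, n + 1)
--             for s in range(2 if f % 2 else 1, n + 1, 2)]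
-- ===== Notes on version B (the rewrite author's own statement) =====
-- stated objective: alternative
-- what changed: B never builds or rotates the odd/even lists and never sorts: it observes that each solution is determined by its first two elements (f,s) and generates them directly in lexicographic order (f = 1..n, opposite-parity s ascending), constructing each solution by +2-with-wraparound value arithmetic instead of interleaving rotated list slices and sorting the collection.
import Mathlib
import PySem

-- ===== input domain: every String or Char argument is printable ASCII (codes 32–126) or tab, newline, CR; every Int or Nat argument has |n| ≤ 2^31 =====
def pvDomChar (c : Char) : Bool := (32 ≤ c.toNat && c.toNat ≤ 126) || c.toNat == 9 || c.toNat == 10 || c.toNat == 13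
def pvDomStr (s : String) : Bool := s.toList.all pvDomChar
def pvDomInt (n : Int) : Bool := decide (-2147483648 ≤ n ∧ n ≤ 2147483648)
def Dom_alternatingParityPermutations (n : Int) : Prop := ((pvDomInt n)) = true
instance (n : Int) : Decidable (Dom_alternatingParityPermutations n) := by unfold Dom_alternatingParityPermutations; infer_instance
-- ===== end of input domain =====

-- B drops the list rotations AND the final sort: each solution is determined by its first two
-- elements, so B generates the solutions directly in lexicographic order by +2-with-wraparound
-- value arithmetic (alternative decomposition; no speed claim).

-- ===== PORT A =====

-- l2[1:] + [l2[0]]  (every call site in A has a nonempty list; [] case unreachable)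
def pvRotA (l : List Int) : List Int :=
  match l with
  | [] => []
  | x :: xs => xs ++ [x]

-- the while-loop of computePermutations plus its two trailing ifs:
-- walks both lists in step (x and y advance together), then appends the single leftover
def pvInterA : List Int → List Int → List Int
  | x :: xs, y :: ys => x :: y :: pvInterA xs ys
  | x :: _, [] => [x]
  | [], y :: _ => [y]
  | [], [] => []

-- inner 'for j in range(len(l2))' loop: state (permutations, l2)
def pvCpInner (l1 : List Int) : Nat → List Int → List (List Int) → List (List Int) × List Int
  | 0, l2, acc => (acc, l2)
  | j + 1, l2, acc => pvCpInner l1 j (pvRotA l2) (acc ++ [pvInterA l1 l2])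

-- outer 'for i in range(len(l1))' loop
def pvCpOuter : Nat → List Int → List Int → List (List Int) → List (List Int)
  | 0, _, _, acc => acc
  | i + 1, l1, l2, acc =>
      let p := pvCpInner l1 l2.length l2 acc
      pvCpOuter i (pvRotA l1) p.2 p.1

def pvComputePermutations (l1 l2 : List Int) : List (List Int) :=
  pvCpOuter l1.length l1 l2 []

def alternatingParityPermutations (n : Int) : List (List Int) :=
  -- for i in range(1, n+1): if i & 1: odd.append(i) else even.append(i); state = (even, odd)
  let p := (PySem.List.pyRange 1 (n + 1) 1).foldl
      (fun (st : List Int × List Int) i =>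
        if PySem.Int.band i 1 ≠ 0 then (st.1, st.2 ++ [i]) else (st.1 ++ [i], st.2))
      ([], [])
  PySem.List.sorted (pvComputePermutations p.2 p.1 ++ pvComputePermutations p.1 p.2)
    (fun x => x) false

-- ===== PORT B =====

-- nxt(v): the next value of v's parity class, +2 with wraparound
def pvNxt (n v : Int) : Int := if v + 2 ≤ n then v + 2 else 2 - PySem.Int.mod v 2

-- the 'for _ in range(m)' loop of build: state (sol, a, b)
def pvBuildLoop (n : Int) : Nat → List Int × Int × Int → List Int × Int × Int
  | 0, st => st
  | m + 1, (sol, a, b) => pvBuildLoop n m (sol ++ [a, b], pvNxt n a, pvNxt n b)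

def pvBuild (n f s : Int) : List Int :=
  let ca := if PySem.Int.mod f 2 ≠ 0 then PySem.Int.floordiv (n + 1) 2 else PySem.Int.floordiv n 2
  let cb := if PySem.Int.mod f 2 ≠ 0 then PySem.Int.floordiv n 2 else PySem.Int.floordiv (n + 1) 2
  let m := min ca cb
  let r := pvBuildLoop n m.toNat ([], f, s)
  r.1 ++ (if m < ca then [r.2.1] else []) ++ (if m < cb then [r.2.2] else [])

def alternatingParityPermutations_alt (n : Int) : List (List Int) :=
  (PySem.List.pyRange 1 (n + 1) 1).flatMap (fun f =>
    (PySem.List.pyRange (if PySem.Int.mod f 2 ≠ 0 then 2 else 1) (n + 1) 2).map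
      (fun s => pvBuild n f s))

-- ===== PRECONDITION & SPEC =====
def Spec_alternatingParityPermutations (n : Int) (out : List (List Int)) : Prop := out = alternatingParityPermutations_alt n
instance (n : Int) (out : List (List Int)) : Decidable (Spec_alternatingParityPermutations n out) := by unfold Spec_alternatingParityPermutations; infer_instance

-- ===== CLAIM (what is proved, stated in full; the proofs are below) =====
def Claim_equal_alternatingParityPermutations : Prop := ∀ (n : Int), Dom_alternatingParityPermutations n → Spec_alternatingParityPermutations n (alternatingParityPermutations n)

-- ===== LEMMAS AND PROOFS =====

-- the odd / even parity-class lists of 1..N, ascending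
def pvOddsL (N : Nat) : List Int := (List.range ((N + 1) / 2)).map (fun t : Nat => (1:Int) + 2 * t)
def pvEvensL (N : Nat) : List Int := (List.range (N / 2)).map (fun t : Nat => (2:Int) + 2 * t)

-- one interleaved solution of A, characterised by modular indexing
def pvSolB (a b : List Int) (i j : Nat) : List Int :=
  let la := a.length
  let lb := b.length
  let m := min la lb
  ((List.range m).flatMap (fun k => [a.getD ((i + k) % la) 0, b.getD ((j + k) % lb) 0]))
    ++ (if m < la then [a.getD ((i + m) % la) 0] else [])
    ++ (if m < lb then [b.getD ((j + m) % lb) 0] else [])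

def pvPermsB (a b : List Int) : List (List Int) :=
  (List.range a.length).flatMap (fun i => (List.range b.length).map (fun j => pvSolB a b i j))

-- ---- A-side analysis (rotations → modular indexing) ----

theorem pvRotA_eq_rotate (l : List Int) : pvRotA l = l.rotate 1 := by
  cases l with
  | nil => simp [pvRotA]
  | cons x xs => rw [pvRotA, show (1:Nat) = 0 + 1 from rfl, List.rotate_cons_succ]; simp

theorem pvCpInner_eq (l1 : List Int) (j : Nat) (l2 : List Int) (acc : List (List Int)) :
    pvCpInner l1 j l2 acc =
      (acc ++ (List.range j).map (fun t => pvInterA l1 (l2.rotate t)), l2.rotate j) := by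
  induction j generalizing l2 acc with
  | zero => simp [pvCpInner]
  | succ j ih =>
      rw [pvCpInner, ih, List.range_succ_eq_map]
      simp [Function.comp, pvRotA_eq_rotate, List.rotate_rotate, Nat.add_comm 1]

theorem pvCpOuter_eq (c : Nat) (l1 l2 : List Int) (acc : List (List Int)) :
    pvCpOuter c l1 l2 acc =
      acc ++ (List.range c).flatMap
        (fun s => (List.range l2.length).map (fun t => pvInterA (l1.rotate s) (l2.rotate t))) := by
  induction c generalizing l1 acc with
  | zero => simp [pvCpOuter]
  | succ c ih =>
      rw [pvCpOuter]
      simp only [pvCpInner_eq, List.rotate_length]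
      rw [ih, List.range_succ_eq_map]
      simp [List.flatMap_map, pvRotA_eq_rotate, List.rotate_rotate,
        Nat.add_comm 1, List.append_assoc]

-- the while-loop interleave, characterised by lengths and positional indexing
theorem pvInterA_eq (xs ys : List Int) :
    pvInterA xs ys =
      ((List.range (min xs.length ys.length)).flatMap (fun k => [xs.getD k 0, ys.getD k 0]))
        ++ (if min xs.length ys.length < xs.length then [xs.getD (min xs.length ys.length) 0] else [])
        ++ (if min xs.length ys.length < ys.length then [ys.getD (min xs.length ys.length) 0] else []) := by
  induction xs generalizing ys with
  | nil => cases ys <;> simp [pvInterA]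
  | cons x xs ih =>
      cases ys with
      | nil => simp [pvInterA]
      | cons y ys =>
          rw [pvInterA, ih]
          have hm : min (x :: xs).length (y :: ys).length = min xs.length ys.length + 1 := by
            simp [Nat.succ_min_succ]
          rw [hm, List.range_succ_eq_map, List.flatMap_cons, List.flatMap_map]
          simp

theorem rotate_getD (a : List Int) (i k : Nat) (hk : k < a.length) :
    (a.rotate i).getD k 0 = a.getD ((i + k) % a.length) 0 := by
  have h1 : k < (a.rotate i).length := by simpa using hk
  have h2 : (i + k) % a.length < a.length := Nat.mod_lt _ (by omega)
  rw [List.getD_eq_getElem _ _ h1, List.getD_eq_getElem _ _ h2, List.getElem_rotate]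
  congr 1
  rw [Nat.add_comm]

theorem pvInterA_rotate (a b : List Int) (i j : Nat)
    (_hi : i < a.length) (_hj : j < b.length) :
    pvInterA (a.rotate i) (b.rotate j) = pvSolB a b i j := by
  rw [pvInterA_eq, pvSolB]
  simp only [List.length_rotate]
  have h1 : (List.range (min a.length b.length)).flatMap
        (fun k => [(a.rotate i).getD k 0, (b.rotate j).getD k 0])
      = (List.range (min a.length b.length)).flatMap
        (fun k => [a.getD ((i + k) % a.length) 0, b.getD ((j + k) % b.length) 0]) := by
    refine List.flatMap_congr (fun k hk => ?_)
    have hk' := List.mem_range.mp hk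
    rw [rotate_getD a i k (by omega), rotate_getD b j k (by omega)]
  have h2 : (if min a.length b.length < a.length
        then [(a.rotate i).getD (min a.length b.length) 0] else [])
      = (if min a.length b.length < a.length
        then [a.getD ((i + min a.length b.length) % a.length) 0] else []) := by
    by_cases h : min a.length b.length < a.length
    · rw [if_pos h, if_pos h, rotate_getD a i _ h]
    · rw [if_neg h, if_neg h]
  have h3 : (if min a.length b.length < b.length
        then [(b.rotate j).getD (min a.length b.length) 0] else [])
      = (if min a.length b.length < b.length
        then [b.getD ((j + min a.length b.length) % b.length) 0] else []) := by
    by_cases h : min a.length b.length < b.length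
    · rw [if_pos h, if_pos h, rotate_getD b j _ h]
    · rw [if_neg h, if_neg h]
  rw [h1, h2, h3]

theorem pvCP_eq_pvPermsB (a b : List Int) : pvComputePermutations a b = pvPermsB a b := by
  rw [pvComputePermutations, pvCpOuter_eq, pvPermsB, List.nil_append]
  refine List.flatMap_congr (fun s hs => ?_)
  refine List.map_congr_left (fun t ht => ?_)
  exact pvInterA_rotate a b s t (List.mem_range.mp hs) (List.mem_range.mp ht)

-- A's parity-partition fold, in closed form
theorem partition_fold (N : Nat) (e o : List Int) :
    ((List.range N).map (fun k : Nat => (1:Int) + k)).foldl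
        (fun (st : List Int × List Int) i =>
          if PySem.Int.band i 1 ≠ 0 then (st.1, st.2 ++ [i]) else (st.1 ++ [i], st.2))
        (e, o)
      = (e ++ pvEvensL N, o ++ pvOddsL N) := by
  induction N with
  | zero => simp [pvOddsL, pvEvensL]
  | succ N ih =>
      rw [List.range_succ, List.map_append, List.foldl_append, ih]
      have hb : PySem.Int.band ((1:Int) + N) 1 = (((1 + N) % 2 : Nat) : Int) := by
        rw [PySem.Int.band_one]
        exact_mod_cast PySem.Int.mod_natCast (1 + N) 2
      rcases Nat.even_or_odd N with h | h
      · have h2 : N % 2 = 0 := Nat.even_iff.mp h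
        have hcond : PySem.Int.band ((1:Int) + N) 1 ≠ 0 := by
          rw [hb]; omega
        simp only [List.map_cons, List.map_nil, List.foldl_cons, List.foldl_nil]
        rw [if_pos hcond]
        have he : (N + 1) / 2 = N / 2 := by omega
        have ho : (N + 1 + 1) / 2 = (N + 1) / 2 + 1 := by omega
        have hv : ((1:Int) + 2 * (N / 2 : Nat)) = (1:Int) + N := by omega
        simp only [pvOddsL, pvEvensL]
        rw [ho, he]
        simp only [List.range_succ, List.map_append, List.map_cons, List.map_nil,
          ← List.append_assoc]
        rw [hv]
      · have h2 : N % 2 = 1 := Nat.odd_iff.mp h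
        have hcond : ¬ (PySem.Int.band ((1:Int) + N) 1 ≠ 0) := by
          rw [hb]
          have h3 : (1 + N) % 2 = 0 := by omega
          simp [h3]
        simp only [List.map_cons, List.map_nil, List.foldl_cons, List.foldl_nil]
        rw [if_neg hcond]
        have ho : (N + 1 + 1) / 2 = (N + 1) / 2 := by omega
        have he2 : (N + 1) / 2 = N / 2 + 1 := by omega
        have hv : ((2:Int) + 2 * (N / 2 : Nat)) = (1:Int) + N := by omega
        simp only [pvOddsL, pvEvensL]
        rw [ho, he2]
        simp only [List.range_succ, List.map_append, List.map_cons, List.map_nil,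
          ← List.append_assoc]
        rw [hv]

theorem pyRange_two_odd (n : Int) : PySem.List.pyRange 1 (n + 1) 2 = pvOddsL n.toNat := by
  rw [PySem.List.pyRange_of_pos _ _ (by norm_num), pvOddsL]
  split_ifs with h
  · have : ((n + 1 - 1 + 2 - 1) / 2).toNat = (n.toNat + 1) / 2 := by omega
    rw [this]
  · have : (n.toNat + 1) / 2 = 0 := by omega
    rw [this]

theorem pyRange_two_even (n : Int) : PySem.List.pyRange 2 (n + 1) 2 = pvEvensL n.toNat := by
  rw [PySem.List.pyRange_of_pos _ _ (by norm_num), pvEvensL]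
  split_ifs with h
  · have : ((n + 1 - 2 + 2 - 1) / 2).toNat = n.toNat / 2 := by omega
    rw [this]
  · have : n.toNat / 2 = 0 := by omega
    rw [this]

-- ---- B-side analysis ----

theorem mod2_odd (i : Nat) : PySem.Int.mod (1 + 2 * (i:Int)) 2 = 1 := by
  rw [PySem.Int.mod_eq_emod_of_pos (by norm_num)]; omega

theorem mod2_even (i : Nat) : PySem.Int.mod (2 + 2 * (i:Int)) 2 = 0 := by
  rw [PySem.Int.mod_eq_emod_of_pos (by norm_num)]; omega

theorem pvBuildLoop_eq (n : Int) (m : Nat) (sol : List Int) (a b : Int) :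
    pvBuildLoop n m (sol, a, b) =
      (sol ++ (List.range m).flatMap (fun k => [(pvNxt n)^[k] a, (pvNxt n)^[k] b]),
        (pvNxt n)^[m] a, (pvNxt n)^[m] b) := by
  induction m generalizing sol a b with
  | zero => simp [pvBuildLoop]
  | succ m ih =>
      rw [pvBuildLoop, ih, List.range_succ_eq_map]
      simp [List.flatMap_cons, List.flatMap_map, Function.iterate_succ_apply, List.append_assoc]

theorem nxt_odd (n : Int) (i : Nat) (hi : i < (n.toNat + 1) / 2) :
    pvNxt n (1 + 2 * (i:Int)) = 1 + 2 * ((((i + 1) % ((n.toNat + 1) / 2)) : Nat) : Int) := by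
  have hn : 0 ≤ n := by omega
  rw [pvNxt]
  by_cases h : 1 + 2 * (i:Int) + 2 ≤ n
  · rw [if_pos h]
    have h2 : (i + 1) % ((n.toNat + 1) / 2) = i + 1 := Nat.mod_eq_of_lt (by omega)
    rw [h2]; push_cast; ring
  · rw [if_neg h, mod2_odd]
    have h2 : i + 1 = (n.toNat + 1) / 2 := by omega
    rw [h2, Nat.mod_self]; norm_num

theorem nxt_even (n : Int) (i : Nat) (hi : i < n.toNat / 2) :
    pvNxt n (2 + 2 * (i:Int)) = 2 + 2 * ((((i + 1) % (n.toNat / 2)) : Nat) : Int) := by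
  have hn : 0 ≤ n := by omega
  rw [pvNxt]
  by_cases h : 2 + 2 * (i:Int) + 2 ≤ n
  · rw [if_pos h]
    have h2 : (i + 1) % (n.toNat / 2) = i + 1 := Nat.mod_eq_of_lt (by omega)
    rw [h2]; push_cast; ring
  · rw [if_neg h, mod2_even]
    have h2 : i + 1 = n.toNat / 2 := by omega
    rw [h2, Nat.mod_self]; norm_num

theorem iter_odd (n : Int) (i k : Nat) (hi : i < (n.toNat + 1) / 2) :
    (pvNxt n)^[k] (1 + 2 * (i:Int)) = 1 + 2 * ((((i + k) % ((n.toNat + 1) / 2)) : Nat) : Int) := by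
  induction k with
  | zero => simp [Nat.mod_eq_of_lt hi]
  | succ k ih =>
      rw [Function.iterate_succ_apply', ih,
        nxt_odd n ((i + k) % ((n.toNat + 1) / 2)) (Nat.mod_lt _ (by omega)),
        Nat.mod_add_mod]
      rfl

theorem iter_even (n : Int) (j k : Nat) (hj : j < n.toNat / 2) :
    (pvNxt n)^[k] (2 + 2 * (j:Int)) = 2 + 2 * ((((j + k) % (n.toNat / 2)) : Nat) : Int) := by
  induction k with
  | zero => simp [Nat.mod_eq_of_lt hj]
  | succ k ih =>
      rw [Function.iterate_succ_apply', ih,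
        nxt_even n ((j + k) % (n.toNat / 2)) (Nat.mod_lt _ (by omega)),
        Nat.mod_add_mod]
      rfl

theorem length_pvOddsL (N : Nat) : (pvOddsL N).length = (N + 1) / 2 := by simp [pvOddsL]
theorem length_pvEvensL (N : Nat) : (pvEvensL N).length = N / 2 := by simp [pvEvensL]

theorem getD_pvOddsL (N i : Nat) (hi : i < (N + 1) / 2) :
    (pvOddsL N).getD i 0 = 1 + 2 * (i:Int) := by
  rw [List.getD_eq_getElem _ _ (by simpa [length_pvOddsL] using hi)]
  simp [pvOddsL]

theorem getD_pvEvensL (N i : Nat) (hi : i < N / 2) :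
    (pvEvensL N).getD i 0 = 2 + 2 * (i:Int) := by
  rw [List.getD_eq_getElem _ _ (by simpa [length_pvEvensL] using hi)]
  simp [pvEvensL]

theorem fd_vals (n : Int) (hn : 0 ≤ n) :
    PySem.Int.floordiv (n + 1) 2 = (((n.toNat + 1) / 2 : Nat) : Int) ∧
    PySem.Int.floordiv n 2 = ((n.toNat / 2 : Nat) : Int) := by
  rw [PySem.Int.floordiv_eq_ediv_of_pos (by norm_num),
    PySem.Int.floordiv_eq_ediv_of_pos (by norm_num)]
  omega

theorem build_odd (n : Int) (i j : Nat)
    (hi : i < (n.toNat + 1) / 2) (hj : j < n.toNat / 2) :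
    pvBuild n (1 + 2 * (i:Int)) (2 + 2 * (j:Int)) = pvSolB (pvOddsL n.toNat) (pvEvensL n.toNat) i j := by
  have hn : 0 ≤ n := by omega
  obtain ⟨h1, h2⟩ := fd_vals n hn
  have hp : 0 < (n.toNat + 1) / 2 := by omega
  have hq : 0 < n.toNat / 2 := by omega
  rw [pvBuild, pvSolB]
  simp only [mod2_odd, h1, h2, length_pvOddsL, length_pvEvensL, ne_eq, one_ne_zero,
    not_false_eq_true, if_true]
  rw [show (min (((n.toNat + 1) / 2 : Nat) : Int) ((n.toNat / 2 : Nat) : Int))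
        = ((min ((n.toNat + 1) / 2) (n.toNat / 2) : Nat) : Int) by push_cast; omega]
  rw [Int.toNat_natCast, pvBuildLoop_eq]
  dsimp only
  rw [List.nil_append]
  congr 1
  · congr 1
    · refine List.flatMap_congr (fun k hk => ?_)
      rw [iter_odd n i k hi, iter_even n j k hj,
        getD_pvOddsL _ _ (Nat.mod_lt _ hp), getD_pvEvensL _ _ (Nat.mod_lt _ hq)]
    · simp only [Nat.cast_lt]
      by_cases h : min ((n.toNat + 1) / 2) (n.toNat / 2) < (n.toNat + 1) / 2
      · rw [if_pos h, if_pos h, iter_odd n i _ hi, getD_pvOddsL _ _ (Nat.mod_lt _ hp)]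
      · rw [if_neg h, if_neg h]
  · simp only [Nat.cast_lt]
    by_cases h : min ((n.toNat + 1) / 2) (n.toNat / 2) < n.toNat / 2
    · rw [if_pos h, if_pos h, iter_even n j _ hj, getD_pvEvensL _ _ (Nat.mod_lt _ hq)]
    · rw [if_neg h, if_neg h]

theorem build_even (n : Int) (i j : Nat)
    (hi : i < (n.toNat + 1) / 2) (hj : j < n.toNat / 2) :
    pvBuild n (2 + 2 * (j:Int)) (1 + 2 * (i:Int)) = pvSolB (pvEvensL n.toNat) (pvOddsL n.toNat) j i := by
  have hn : 0 ≤ n := by omega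
  obtain ⟨h1, h2⟩ := fd_vals n hn
  have hp : 0 < (n.toNat + 1) / 2 := by omega
  have hq : 0 < n.toNat / 2 := by omega
  rw [pvBuild, pvSolB]
  simp only [mod2_even, h1, h2, length_pvOddsL, length_pvEvensL, ne_eq,
    not_true_eq_false, if_false]
  rw [show (min ((n.toNat / 2 : Nat) : Int) (((n.toNat + 1) / 2 : Nat) : Int))
        = ((min (n.toNat / 2) ((n.toNat + 1) / 2) : Nat) : Int) by push_cast; omega]
  rw [Int.toNat_natCast, pvBuildLoop_eq]
  dsimp only
  rw [List.nil_append]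
  congr 1
  · congr 1
    · refine List.flatMap_congr (fun k hk => ?_)
      rw [iter_even n j k hj, iter_odd n i k hi,
        getD_pvEvensL _ _ (Nat.mod_lt _ hq), getD_pvOddsL _ _ (Nat.mod_lt _ hp)]
    · simp only [Nat.cast_lt]
      by_cases h : min (n.toNat / 2) ((n.toNat + 1) / 2) < n.toNat / 2
      · rw [if_pos h, if_pos h, iter_even n j _ hj, getD_pvEvensL _ _ (Nat.mod_lt _ hq)]
      · rw [if_neg h, if_neg h]
  · simp only [Nat.cast_lt]
    by_cases h : min (n.toNat / 2) ((n.toNat + 1) / 2) < (n.toNat + 1) / 2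
    · rw [if_pos h, if_pos h, iter_odd n i _ hi, getD_pvOddsL _ _ (Nat.mod_lt _ hp)]
    · rw [if_neg h, if_neg h]

-- stepping the parity-class lists
theorem pvOddsL_succ_even (N : Nat) (h : N % 2 = 0) :
    pvOddsL (N + 1) = pvOddsL N ++ [(1:Int) + N] := by
  simp only [pvOddsL]
  rw [show (N + 1 + 1) / 2 = (N + 1) / 2 + 1 by omega, List.range_succ, List.map_append]
  simp only [List.map_cons, List.map_nil]
  congr 2
  push_cast
  omega

theorem pvEvensL_succ_even (N : Nat) (h : N % 2 = 0) : pvEvensL (N + 1) = pvEvensL N := by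
  simp only [pvEvensL]
  rw [show (N + 1) / 2 = N / 2 by omega]

theorem pvOddsL_succ_odd (N : Nat) (h : N % 2 = 1) : pvOddsL (N + 1) = pvOddsL N := by
  simp only [pvOddsL]
  rw [show (N + 1 + 1) / 2 = (N + 1) / 2 by omega]

theorem pvEvensL_succ_odd (N : Nat) (h : N % 2 = 1) :
    pvEvensL (N + 1) = pvEvensL N ++ [(1:Int) + N] := by
  simp only [pvEvensL]
  rw [show (N + 1) / 2 = N / 2 + 1 by omega, List.range_succ, List.map_append]
  simp only [List.map_cons, List.map_nil]
  congr 2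
  push_cast
  omega

-- 1..N is a permutation of odds-then-evens
theorem range1_perm (N : Nat) :
    ((List.range N).map (fun k : Nat => (1:Int) + k)).Perm (pvOddsL N ++ pvEvensL N) := by
  induction N with
  | zero => simp [pvOddsL, pvEvensL]
  | succ N ih =>
      rw [List.range_succ, List.map_append]
      rcases Nat.even_or_odd N with h | h
      · have h2 : N % 2 = 0 := Nat.even_iff.mp h
        rw [pvOddsL_succ_even N h2, pvEvensL_succ_even N h2]
        refine ((ih.append_right _).trans ?_)
        simp only [List.map_cons, List.map_nil, List.append_assoc]
        exact List.Perm.append_left _ List.perm_append_comm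
      · have h2 : N % 2 = 1 := Nat.odd_iff.mp h
        rw [pvOddsL_succ_odd N h2, pvEvensL_succ_odd N h2]
        refine ((ih.append_right _).trans ?_)
        simp only [List.map_cons, List.map_nil, List.append_assoc]
        exact List.Perm.refl _

theorem buildLoop_shape (n f s : Int) (m : Nat) (hm : 1 ≤ m) :
    ∃ t, (pvBuildLoop n m ([], f, s)).1 = f :: s :: t := by
  obtain ⟨K, rfl⟩ : ∃ K, m = K + 1 := ⟨m - 1, by omega⟩
  rw [pvBuildLoop_eq]
  refine ⟨(List.range K).flatMap (fun k => [(pvNxt n)^[k + 1] f, (pvNxt n)^[k + 1] s]), ?_⟩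
  dsimp only
  rw [List.nil_append, List.range_succ_eq_map, List.flatMap_cons, List.flatMap_map]
  simp [Function.iterate_succ_apply]

-- every solution of B starts with its two generating values
theorem pvBuild_shape (n f s : Int) (h2 : 2 ≤ n) :
    ∃ t, pvBuild n f s = f :: s :: t := by
  have hn : 0 ≤ n := by omega
  obtain ⟨hh1, hh2⟩ := fd_vals n hn
  by_cases hf : PySem.Int.mod f 2 ≠ 0
  · simp only [pvBuild, ne_eq, hf, not_false_eq_true, if_true, hh1, hh2]
    obtain ⟨t, ht⟩ := buildLoop_shape n f s _
      (show 1 ≤ (min ((((n.toNat + 1) / 2 : Nat)) : Int) ((n.toNat / 2 : Nat) : Int)).toNat by omega)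
    rw [ht]
    simp only [List.cons_append]
    exact ⟨_, rfl⟩
  · simp only [pvBuild, hf, if_false, hh1, hh2]
    obtain ⟨t, ht⟩ := buildLoop_shape n f s _
      (show 1 ≤ (min ((n.toNat / 2 : Nat) : Int) ((((n.toNat + 1) / 2 : Nat)) : Int)).toNat by omega)
    rw [ht]
    simp only [List.cons_append]
    exact ⟨_, rfl⟩

theorem pairwise_pyRange_two (a b : Int) :
    (PySem.List.pyRange a b 2).Pairwise (fun x y => x < y) := by
  rw [PySem.List.pyRange_of_pos _ _ (by norm_num)]
  refine List.pairwise_map.mpr ?_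
  exact List.pairwise_lt_range.imp (fun h => by omega)

-- any admitted (f, s) generating pair forces n ≥ 2
theorem two_le_of_mem (n f s : Int) (hf : f ∈ PySem.List.pyRange 1 (n + 1) 1)
    (hs : s ∈ PySem.List.pyRange (if PySem.Int.mod f 2 ≠ 0 then 2 else 1) (n + 1) 2) :
    2 ≤ n := by
  rw [PySem.List.mem_pyRange_one] at hf
  rw [PySem.List.mem_pyRange_iff_of_pos (by norm_num)] at hs
  by_cases h : PySem.Int.mod f 2 ≠ 0
  · rw [if_pos h] at hs
    omega
  · have h0 : PySem.Int.mod f 2 = 0 := not_not.mp h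
    have hmod : PySem.Int.mod f 2 = f % 2 := PySem.Int.mod_eq_emod_of_pos (by norm_num)
    omega

-- B's output is pairwise strictly increasing (Python list order = lexicographic)
theorem pairwise_alt (n : Int) :
    (alternatingParityPermutations_alt n).Pairwise (fun a b => a < b) := by
  rw [alternatingParityPermutations_alt]
  rw [List.pairwise_flatMap]
  constructor
  · intro f hfmem
    rw [List.pairwise_map]
    refine List.Pairwise.imp_of_mem ?_ (pairwise_pyRange_two _ _)
    intro s1 s2 hs1 hs2 hlt
    have h2n : 2 ≤ n := two_le_of_mem n f s1 hfmem hs1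
    obtain ⟨t1, ht1⟩ := pvBuild_shape n f s1 h2n
    obtain ⟨t2, ht2⟩ := pvBuild_shape n f s2 h2n
    rw [ht1, ht2, List.cons_lt_cons_iff]
    exact Or.inr ⟨rfl, by rw [List.cons_lt_cons_iff]; exact Or.inl hlt⟩
  · refine List.Pairwise.imp_of_mem ?_ (PySem.List.pairwise_lt_pyRange_one 1 (n + 1))
    intro f1 f2 hf1 hf2 hlt x hx y hy
    obtain ⟨s1, hs1, rfl⟩ := List.mem_map.mp hx
    obtain ⟨s2, hs2, rfl⟩ := List.mem_map.mp hy
    obtain ⟨t1, ht1⟩ := pvBuild_shape n f1 s1 (two_le_of_mem n f1 s1 hf1 hs1)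
    obtain ⟨t2, ht2⟩ := pvBuild_shape n f2 s2 (two_le_of_mem n f2 s2 hf2 hs2)
    rw [ht1, ht2, List.cons_lt_cons_iff]
    exact Or.inl hlt

-- B's output is a permutation of A's pre-sort collection
theorem perm_alt (n : Int) :
    (alternatingParityPermutations_alt n).Perm
      (pvPermsB (pvOddsL n.toNat) (pvEvensL n.toNat) ++ pvPermsB (pvEvensL n.toNat) (pvOddsL n.toNat)) := by
  rw [alternatingParityPermutations_alt, PySem.List.pyRange_one]
  have hN : (n + 1 - 1).toNat = n.toNat := by omega
  rw [hN]
  refine (List.Perm.flatMap_right _ (range1_perm n.toNat)).trans ?_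
  rw [List.flatMap_append]
  have hO : (pvOddsL n.toNat).flatMap (fun f =>
      (PySem.List.pyRange (if PySem.Int.mod f 2 ≠ 0 then 2 else 1) (n + 1) 2).map
        (fun s => pvBuild n f s)) = pvPermsB (pvOddsL n.toNat) (pvEvensL n.toNat) := by
    rw [pvPermsB, length_pvOddsL, length_pvEvensL, pvOddsL, List.flatMap_map]
    refine List.flatMap_congr (fun i hi => ?_)
    have hi' := List.mem_range.mp hi
    simp only [mod2_odd, ne_eq, one_ne_zero, not_false_eq_true, if_true,
      pyRange_two_even, pvEvensL, List.map_map]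
    refine List.map_congr_left (fun j hj => ?_)
    have hj' := List.mem_range.mp hj
    exact build_odd n i j hi' hj'
  have hE : (pvEvensL n.toNat).flatMap (fun f =>
      (PySem.List.pyRange (if PySem.Int.mod f 2 ≠ 0 then 2 else 1) (n + 1) 2).map
        (fun s => pvBuild n f s)) = pvPermsB (pvEvensL n.toNat) (pvOddsL n.toNat) := by
    rw [pvPermsB, length_pvOddsL, length_pvEvensL, pvEvensL, List.flatMap_map]
    refine List.flatMap_congr (fun j hj => ?_)
    have hj' := List.mem_range.mp hj
    simp only [mod2_even, ne_eq, not_true_eq_false, if_false,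
      pyRange_two_odd, pvOddsL, List.map_map]
    refine List.map_congr_left (fun i hi => ?_)
    have hi' := List.mem_range.mp hi
    exact build_even n i j hi' hj'
  rw [hO, hE]

-- ===== VERDICT (by name: the statement is the Claim_ definition above) =====
theorem alternatingParityPermutations_spec : Claim_equal_alternatingParityPermutations := by
  intro n _
  unfold Spec_alternatingParityPermutations
  rw [alternatingParityPermutations]
  rw [PySem.List.pyRange_one]
  have hN : (n + 1 - 1).toNat = n.toNat := by omega
  rw [hN, partition_fold]
  simp only [pvCP_eq_pvPermsB, List.nil_append]
  have h := PySem.List.sorted_eq_of_perm_of_pairwise_lt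
    (pvPermsB (pvOddsL n.toNat) (pvEvensL n.toNat) ++ pvPermsB (pvEvensL n.toNat) (pvOddsL n.toNat))
    (alternatingParityPermutations_alt n) (fun x => x) (perm_alt n) (pairwise_alt n)
  convert h using 2
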